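-- pv_equiv track=rewrite | github.com/stormspiritlc/codewars | 4kyu/5x5_Nonogram_Solver.py | structure
-- ===== SOURCE A (Python) =====
-- clue = (4,1,1)
--
-- def structure(clue):
--     sample = []
--     for index, val in enumerate(clue):
--         while val >= 1:
--             sample.append(1)
--             val -= 1
--         if index != len(clue)-1:
--             sample.append(0)
--     return sample
--
-- sample = structure(clue)
-- ===== SOURCE B (Python) =====
-- def structure(clue):
--     # Preallocate the whole row as filled cells, then punch separator zeros
--     # at the computed boundary positions (prefix-sum indexing); no per-cell
--     # emission loop and no index-vs-length branch.
--     if not clue: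
--         return []
--     ones = [v if v > 0 else 0 for v in clue]
--     out = [1] * (sum(ones) + len(clue) - 1)
--     p = 0
--     for v in ones[:-1]:
--         p += v
--         out[p] = 0
--         p += 1
--     return out
-- ===== Notes on version B (the rewrite author's own statement) =====
-- stated objective: alternative
-- what changed: B preallocates the whole row as ones of the computed total length and punches the separator zeros at prefix-sum boundary positions, instead of A's per-element emission with an inner while-loop and an index-vs-last branch.
import Mathlib
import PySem

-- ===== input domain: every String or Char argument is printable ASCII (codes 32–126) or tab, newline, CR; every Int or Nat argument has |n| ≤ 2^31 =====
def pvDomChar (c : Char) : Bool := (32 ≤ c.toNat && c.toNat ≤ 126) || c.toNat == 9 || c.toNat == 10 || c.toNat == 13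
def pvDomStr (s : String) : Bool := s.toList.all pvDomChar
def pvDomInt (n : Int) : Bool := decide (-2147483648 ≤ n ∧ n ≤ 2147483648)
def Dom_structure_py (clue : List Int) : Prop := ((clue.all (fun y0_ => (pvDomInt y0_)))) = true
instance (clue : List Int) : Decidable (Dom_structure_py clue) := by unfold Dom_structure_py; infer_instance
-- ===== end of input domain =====

-- B preallocates the row as all ones of the computed total length and punches the
-- separator zeros at prefix-sum boundary positions (alternative construction).

-- ===== PORT A =====
-- inner 'while val >= 1: sample.append(1); val -= 1'
def pvWhileOnes (val : Int) (sample : List Int) : List Int :=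
  if val ≥ 1 then pvWhileOnes (val - 1) (sample ++ [1]) else sample
termination_by val.toNat
decreasing_by omega

-- 'for index, val in enumerate(clue): …'; the 'index != len(clue)-1' test is
-- exactly 'the rest of the list is nonempty', which the match discriminates.
def pvLoopA (sample : List Int) : List Int → List Int
  | [] => sample
  | v :: [] => pvWhileOnes v sample
  | v :: rest => pvLoopA (pvWhileOnes v sample ++ [0]) rest

def structure_py (clue : List Int) : List Int := pvLoopA [] clue

-- ===== PORT B =====
-- 'for v in ones[:-1]: p += v; out[p] = 0; p += 1' — p is always a valid
-- nonnegative index, so 'out[p] = 0' is List.set at (p).toNat (exact here).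
def pvPunch (out : List Int) (p : Int) : List Int → List Int
  | [] => out
  | v :: rest => pvPunch (out.set (p + v).toNat 0) (p + v + 1) rest

-- ones = '[v if v > 0 else 0 for v in clue]'; out = '[1] * (sum(ones)+len(clue)-1)';
-- 'ones[:-1]' = dropLast; empty clue returns [].
def structure_py_alt (clue : List Int) : List Int :=
  if clue = [] then []
  else
    pvPunch
      (List.replicate ((clue.map (fun v => if v > 0 then v else 0)).sum + (clue.length : Int) - 1).toNat 1)
      0
      (clue.map (fun v => if v > 0 then v else 0)).dropLast

-- ===== PRECONDITION & SPEC =====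
def Spec_structure_py (clue : List Int) (out : List Int) : Prop := out = structure_py_alt clue
instance (clue : List Int) (out : List Int) : Decidable (Spec_structure_py clue out) := by unfold Spec_structure_py; infer_instance

-- ===== CLAIM (what is proved, stated in full; the proofs are below) =====
def Claim_equal_structure_py : Prop := ∀ (clue : List Int), Dom_structure_py clue → Spec_structure_py clue (structure_py clue)

-- ===== LEMMAS AND PROOFS =====
theorem pvWhileOnes_eq (val : Int) (sample : List Int) :
    pvWhileOnes val sample = sample ++ List.replicate val.toNat 1 := by
  induction val, sample using pvWhileOnes.induct with
  | case1 val sample h ih =>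
      rw [pvWhileOnes, if_pos h, ih]
      have : val.toNat = (val - 1).toNat + 1 := by omega
      rw [this, List.replicate_succ]
      simp
  | case2 val sample h =>
      rw [pvWhileOnes, if_neg h]
      have : val.toNat = 0 := by omega
      simp [this]

-- A's result is the blocks joined by trailing zeros, with the last zero dropped
theorem pvLoopA_eq (rest : List Int) : ∀ (v : Int) (sample : List Int),
    pvLoopA sample (v :: rest)
      = sample ++ ((v :: rest).flatMap (fun v => List.replicate v.toNat 1 ++ [0])).dropLast := by
  induction rest with
  | nil =>
      intro v sample
      simp [pvLoopA, pvWhileOnes_eq, List.flatMap_cons]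
  | cons w rest' ih =>
      intro v sample
      rw [pvLoopA, ih w (pvWhileOnes v sample ++ [0]), pvWhileOnes_eq]
      simp only [List.flatMap_cons, List.append_assoc]
      rw [List.dropLast_append_of_ne_nil (by simp)]
      · simp [List.dropLast_cons_of_ne_nil]
      · simp

-- punching zeros into a preallocated block of ones yields the joined blocks
theorem pvPunch_eq (ws : List Int) : ∀ (pre : List Int) (k : Nat),
    (∀ w ∈ ws, 0 ≤ w) →
    pvPunch (pre ++ List.replicate ((ws.map Int.toNat).sum + ws.length + k) 1)
        (pre.length : Int) ws
      = pre ++ ws.flatMap (fun w => List.replicate w.toNat 1 ++ [0]) ++ List.replicate k 1 := by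
  induction ws with
  | nil => intro pre k _; simp [pvPunch]
  | cons w ws ih =>
      intro pre k hnn
      have hw : 0 ≤ w := hnn w (by simp)
      have hrep : List.replicate (((w :: ws).map Int.toNat).sum + (w :: ws).length + k) (1 : Int)
          = List.replicate w.toNat 1 ++ 1 :: List.replicate ((ws.map Int.toNat).sum + ws.length + k) 1 := by
        have h1 : ((w :: ws).map Int.toNat).sum + (w :: ws).length + k
            = w.toNat + (((ws.map Int.toNat).sum + ws.length + k) + 1) := by
          simp [List.sum_cons]; omega
        rw [h1, List.replicate_add, List.replicate_succ]
      rw [pvPunch, hrep, ← List.append_assoc]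
      have hidx : ((pre.length : Int) + w).toNat
          = (pre ++ List.replicate w.toNat (1 : Int)).length := by
        simp; omega
      rw [hidx, List.set_append_right _ _ le_rfl, Nat.sub_self]
      have hset0 : ((1 : Int) :: List.replicate ((ws.map Int.toNat).sum + ws.length + k) 1).set 0 0
          = (0 : Int) :: List.replicate ((ws.map Int.toNat).sum + ws.length + k) 1 := rfl
      rw [hset0]
      have hsplit : (pre ++ List.replicate w.toNat (1 : Int))
            ++ (0 : Int) :: List.replicate ((ws.map Int.toNat).sum + ws.length + k) 1
          = (pre ++ List.replicate w.toNat 1 ++ [0])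
            ++ List.replicate ((ws.map Int.toNat).sum + ws.length + k) 1 := by simp
      rw [hsplit]
      have hp : (pre.length : Int) + w + 1
          = (((pre ++ List.replicate w.toNat (1 : Int) ++ [0])).length : Int) := by
        simp; omega
      rw [hp, ih (pre ++ List.replicate w.toNat 1 ++ [0]) k
        (fun x hx => hnn x (List.mem_cons_of_mem _ hx))]
      simp [List.flatMap_cons]

-- the sum of the clamped Int clues equals the Nat sum of their toNats, as integers
theorem pvPunch_eq0 (ws : List Int) (k : Nat) (h : ∀ w ∈ ws, 0 ≤ w) :
    pvPunch (List.replicate ((ws.map Int.toNat).sum + ws.length + k) 1) 0 ws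
      = ws.flatMap (fun w => List.replicate w.toNat 1 ++ [0]) ++ List.replicate k 1 := by
  have h0 := pvPunch_eq ws [] k h
  simpa using h0

theorem pvSum_clamp (xs : List Int) :
    (xs.map (fun v => if v > 0 then v else 0)).sum = ((xs.map Int.toNat).sum : Int) := by
  induction xs with
  | nil => simp
  | cons x xs ih =>
      simp only [List.map_cons, List.sum_cons, ih]
      push_cast
      split_ifs with h <;> omega

-- the blocks formed from the clamped clues are the blocks of the clues themselves
theorem pvFlat_clamp (xs : List Int) :
    (xs.map (fun v => if v > 0 then v else 0)).flatMap
        (fun w => List.replicate w.toNat (1 : Int) ++ [0])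
      = xs.flatMap (fun v => List.replicate v.toNat 1 ++ [0]) := by
  induction xs with
  | nil => simp
  | cons a xs ih =>
      simp only [List.map_cons, List.flatMap_cons, ih]
      have : (if a > 0 then a else 0).toNat = a.toNat := by split_ifs <;> omega
      rw [this]

theorem pvToNat_clamp (xs : List Int) :
    (xs.map (fun v => if v > 0 then v else 0)).map Int.toNat = xs.map Int.toNat := by
  rw [List.map_map]
  apply List.map_congr_left
  intro a _
  simp only [Function.comp]
  split_ifs <;> omega

-- ===== VERDICT (by name: the statement is the Claim_ definition above) =====
theorem structure_py_spec : Claim_equal_structure_py := by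
  intro clue _
  unfold Spec_structure_py structure_py structure_py_alt
  rcases List.eq_nil_or_concat clue with hnil | ⟨xs, x, h⟩
  · subst hnil; simp [pvLoopA]
  · rw [List.concat_eq_append] at h
    subst h
    rw [if_neg (by simp)]
    obtain ⟨v, rest, hcons⟩ : ∃ v rest, xs ++ [x] = v :: rest := by
      cases xs with
      | nil => exact ⟨x, [], rfl⟩
      | cons a as => exact ⟨a, as ++ [x], rfl⟩
    rw [hcons, pvLoopA_eq, ← hcons, List.nil_append]
    -- A side: split off the last block and drop its trailing zero
    rw [List.flatMap_append]
    simp only [List.flatMap_cons, List.flatMap_nil, List.append_nil]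
    rw [show xs.flatMap (fun v => List.replicate v.toNat (1 : Int) ++ [0])
          ++ (List.replicate x.toNat 1 ++ [0])
        = (xs.flatMap (fun v => List.replicate v.toNat 1 ++ [0])
            ++ List.replicate x.toNat 1) ++ [0] from by simp,
      List.dropLast_concat]
    -- B side: peel the last clamped clue off the ones list
    rw [show (xs ++ [x]).map (fun v => if v > 0 then v else 0)
        = xs.map (fun v => if v > 0 then v else 0) ++ [if x > 0 then x else 0] from by simp,
      List.dropLast_concat]
    have hlen : ((xs.map (fun v => if v > 0 then v else 0) ++ [if x > 0 then x else 0]).sum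
          + ((xs ++ [x]).length : Int) - 1).toNat
        = ((xs.map (fun v => if v > 0 then v else 0)).map Int.toNat).sum
          + (xs.map (fun v => if v > 0 then v else 0)).length + x.toNat := by
      rw [List.sum_append, pvSum_clamp, pvToNat_clamp]
      simp only [List.sum_cons, List.sum_nil, List.length_append, List.length_map,
        List.length_cons, List.length_nil]
      split_ifs <;> omega
    rw [hlen,
      pvPunch_eq0 _ x.toNat (by
        intro w hw
        simp only [List.mem_map] at hw
        obtain ⟨a, _, rfl⟩ := hw
        split_ifs <;> omega),
      pvFlat_clamp]
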